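-- pv_equiv track=rewrite | github.com/ErikaRedmark/lets_play_puzzles | assembly_of_the_planners/demonstrations_lp/empty_grid.py | invert_solution
-- ===== SOURCE A (Python) =====
-- BOARD_LOCATIONS = [
--                                             (0, 5), (0, 6),
--                             (1, 3), (1, 4), (1, 5), (1, 6),
--                     (2, 2), (2, 3), (2, 4), (2, 5), (2, 6),
--             (3, 1), (3, 2), (3, 3), (3, 4), (3, 5), (3, 6),
--             (4, 1), (4, 2), (4, 3), (4, 4), (4, 5), (4, 6),
--     (5, 0), (5, 1), (5, 2), (5, 3), (5, 4), (5, 5), (5, 6),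
--     (6, 0), (6, 1), (6, 2), (6, 3), (6, 4), (6, 5),
--     (7, 0), (7, 1), (7, 2), (7, 3), (7, 4), (7, 5),
--             (8, 1), (8, 2), (8, 3), (8, 4), (8, 5),
--             (9, 1), (9, 2), (9, 3), (9, 4), (9, 5),
--                     (10, 2), (10, 3), (10, 4), (10, 5),
--                              (11, 3), (11, 4), (11, 5),
--                                                (12, 5)
-- ]
--
-- def invert_solution(solution):
--     board_loc_copy = list(BOARD_LOCATIONS)
--     for piece in solution:
--         piece_locations = piece[1]
--         for piece_loc in piece_locations:
--             if piece_loc in board_loc_copy: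
--                 board_loc_copy.remove(piece_loc)
--     return solution + [(("empty", board_loc_copy))]
-- ===== SOURCE B (Python) =====
-- # Board described by per-row column extents instead of an explicit cell list.
-- ROW_EXTENTS = [
--     (0, 5, 6), (1, 3, 6), (2, 2, 6), (3, 1, 6), (4, 1, 6), (5, 0, 6),
--     (6, 0, 5), (7, 0, 5), (8, 1, 5), (9, 1, 5), (10, 2, 5), (11, 3, 5),
--     (12, 5, 5),
-- ]
--
-- def invert_solution(solution):
--     covered = {loc for _, locs in solution for loc in locs}
--     uncovered = [(r, c)
--                  for (r, lo, hi) in ROW_EXTENTS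
--                  for c in range(lo, hi + 1)
--                  if (r, c) not in covered]
--     return solution + [("empty", uncovered)]
-- ===== Notes on version B (the rewrite author's own statement) =====
-- stated objective: idiomatic
-- what changed: B stores the board as per-row column extents and, after building a set of covered cells once, generates the uncovered cells row by row in one comprehension, instead of A's outer loop over pieces mutating an explicit board-cell list copy with repeated membership tests and list.remove scans.
import Mathlib
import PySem

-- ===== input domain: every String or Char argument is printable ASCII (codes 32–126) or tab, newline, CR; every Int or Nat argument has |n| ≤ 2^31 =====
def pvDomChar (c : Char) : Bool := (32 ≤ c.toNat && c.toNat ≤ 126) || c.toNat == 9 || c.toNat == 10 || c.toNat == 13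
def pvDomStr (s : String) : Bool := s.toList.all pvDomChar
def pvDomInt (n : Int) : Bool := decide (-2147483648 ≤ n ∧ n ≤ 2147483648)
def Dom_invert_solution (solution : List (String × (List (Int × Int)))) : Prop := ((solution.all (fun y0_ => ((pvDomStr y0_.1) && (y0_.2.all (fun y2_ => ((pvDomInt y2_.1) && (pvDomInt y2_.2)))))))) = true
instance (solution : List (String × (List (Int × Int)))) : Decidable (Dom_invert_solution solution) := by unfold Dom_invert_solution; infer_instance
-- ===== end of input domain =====

-- B stores the board as per-row column extents and generates uncovered cells
-- row by row against a covered-set built once, instead of A's mutate-while-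
-- scanning over an explicit board-cell list copy; idiomatic, same result.

-- ===== PORT A =====
-- A's module constant BOARD_LOCATIONS, verbatim
def pvBoard : List (Int × Int) := [
                                            (0, 5), (0, 6),
                            (1, 3), (1, 4), (1, 5), (1, 6),
                    (2, 2), (2, 3), (2, 4), (2, 5), (2, 6),
            (3, 1), (3, 2), (3, 3), (3, 4), (3, 5), (3, 6),
            (4, 1), (4, 2), (4, 3), (4, 4), (4, 5), (4, 6),
    (5, 0), (5, 1), (5, 2), (5, 3), (5, 4), (5, 5), (5, 6),
    (6, 0), (6, 1), (6, 2), (6, 3), (6, 4), (6, 5),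
    (7, 0), (7, 1), (7, 2), (7, 3), (7, 4), (7, 5),
            (8, 1), (8, 2), (8, 3), (8, 4), (8, 5),
            (9, 1), (9, 2), (9, 3), (9, 4), (9, 5),
                    (10, 2), (10, 3), (10, 4), (10, 5),
                             (11, 3), (11, 4), (11, 5),
                                               (12, 5)]

-- 'if piece_loc in board_loc_copy: board_loc_copy.remove(piece_loc)'; remove of a
-- present element is List.erase (first occurrence), exact here.
def invert_solution (solution : List (String × (List (Int × Int)))) : List (String × (List (Int × Int))) :=
  let board_loc_copy :=
    solution.foldl (fun b piece =>
      piece.2.foldl (fun b piece_loc =>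
        if piece_loc ∈ b then b.erase piece_loc else b) b) pvBoard
  solution ++ [("empty", board_loc_copy)]

-- ===== PORT B =====
-- B's module constant ROW_EXTENTS: (row, first column, last column)
def pvRowExtents : List (Int × Int × Int) :=
  [(0, 5, 6), (1, 3, 6), (2, 2, 6), (3, 1, 6), (4, 1, 6), (5, 0, 6),
   (6, 0, 5), (7, 0, 5), (8, 1, 5), (9, 1, 5), (10, 2, 5), (11, 3, 5),
   (12, 5, 5)]

def invert_solution_alt (solution : List (String × (List (Int × Int)))) : List (String × (List (Int × Int))) :=
  let covered : PySem.Set (Int × Int) := PySem.Set.ofList (solution.flatMap (fun piece => piece.2))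
  let uncovered :=
    pvRowExtents.flatMap (fun re =>
      ((PySem.List.pyRange re.2.1 (re.2.2 + 1) 1).map (fun c => (re.1, c))).filter
        (fun rc => !(PySem.Set.contains covered rc)))
  solution ++ [("empty", uncovered)]

-- ===== PRECONDITION & SPEC =====
def Spec_invert_solution (solution : List (String × (List (Int × Int)))) (out : List (String × (List (Int × Int)))) : Prop := out = invert_solution_alt solution
instance (solution : List (String × (List (Int × Int)))) (out : List (String × (List (Int × Int)))) : Decidable (Spec_invert_solution solution out) := by unfold Spec_invert_solution; infer_instance

-- ===== CLAIM (what is proved, stated in full; the proofs are below) =====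
def Claim_equal_invert_solution : Prop := ∀ (solution : List (String × (List (Int × Int)))), Dom_invert_solution solution → Spec_invert_solution solution (invert_solution solution)

-- ===== LEMMAS AND PROOFS =====

-- nested foldl over pieces = foldl over the flattened covered-cell list
theorem pv_foldl_flat {α β γ : Type} (f : γ → α → γ) (sol : List (β × List α)) (b : γ) :
    sol.foldl (fun b p => p.2.foldl f b) b = (sol.flatMap (fun p => p.2)).foldl f b := by
  induction sol generalizing b with
  | nil => rfl
  | cons p rest ih => simp [List.flatMap_cons, List.foldl_append, ih]

-- repeated guarded erase from a duplicate-free list = a single filter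
theorem pv_removeAll_eq_filter (cs : List (Int × Int)) (L : List (Int × Int))
    (hL : L.Nodup) :
    cs.foldl (fun b c => if c ∈ b then b.erase c else b) L
      = L.filter (fun x => decide (x ∉ cs)) := by
  induction cs generalizing L with
  | nil => simp
  | cons c cs ih =>
    simp only [List.foldl_cons]
    by_cases hc : c ∈ L
    · rw [if_pos hc, ih _ (hL.erase c), hL.erase_eq_filter]
      simp only [List.filter_filter]
      apply List.filter_congr
      intro x _
      by_cases hx : x = c <;> simp [hx]
    · rw [if_neg hc, ih _ hL]
      apply List.filter_congr
      intro x hx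
      have : x ≠ c := fun h => hc (h ▸ hx)
      simp [this]

theorem pv_board_nodup : pvBoard.Nodup := by decide

-- B's row-extent expansion enumerates exactly A's BOARD_LOCATIONS, in order
theorem pv_rows_flat :
    pvRowExtents.flatMap (fun re => (PySem.List.pyRange re.2.1 (re.2.2 + 1) 1).map (fun c => (re.1, c)))
      = pvBoard := by decide

-- filtering inside each row then concatenating = concatenating then filtering
theorem pv_flatMap_filter {α β : Type} (l : List α) (f : α → List β) (p : β → Bool) :
    l.flatMap (fun x => (f x).filter p) = (l.flatMap f).filter p := by
  induction l with
  | nil => rfl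
  | cons x xs ih => simp [List.flatMap_cons, List.filter_append, ih]

-- ===== VERDICT (by name: the statement is the Claim_ definition above) =====
theorem invert_solution_spec : Claim_equal_invert_solution := by
  intro solution _
  unfold Spec_invert_solution invert_solution invert_solution_alt
  simp only []
  congr 2
  rw [pv_foldl_flat, pv_removeAll_eq_filter _ _ pv_board_nodup,
      pv_flatMap_filter, pv_rows_flat]
  refine congrArg (fun l => ("empty", l)) (List.filter_congr ?_)
  intro x _
  simp [PySem.Set.contains, PySem.Set.mem_ofList]
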